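-- pv_equiv track=rewrite | github.com/bayerandrea091-ux/gainaccess-bot | main.py | _media_kind
-- ===== SOURCE A (Python) =====
-- def _media_kind(url: str, forced: str) -> str:
--     """Infer media kind when UI_MEDIA_TYPE not set."""
--     if forced in ("video", "gif", "photo"):
--         return forced
--     u = (url or "").lower()
--     if any(u.endswith(ext) for ext in (".mp4", ".mov", ".m4v", ".webm")):
--         return "video"
--     if any(u.endswith(ext) for ext in (".gif", ".gifv", ".apng")):
--         return "gif"
--     if any(u.endswith(ext) for ext in (".jpg", ".jpeg", ".png", ".webp", ".bmp", ".heic", ".heif")):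
--         return "photo"
--     return ""
-- ===== SOURCE B (Python) =====
-- _KIND_BY_EXT = {
--     ".mp4": "video", ".mov": "video", ".m4v": "video", ".webm": "video",
--     ".gif": "gif", ".gifv": "gif", ".apng": "gif",
--     ".jpg": "photo", ".jpeg": "photo", ".png": "photo", ".webp": "photo",
--     ".bmp": "photo", ".heic": "photo", ".heif": "photo",
-- }
--
--
-- def _media_kind(url: str, forced: str) -> str:
--     if forced in ("video", "gif", "photo"):
--         return forced
--     u = (url or "").lower()
--     if "." not in u:
--         return ""
--     ext = "." + u.rsplit(".", 1)[-1]
--     return _KIND_BY_EXT.get(ext, "")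
-- ===== Notes on version B (the rewrite author's own statement) =====
-- stated objective: idiomatic
-- what changed: Replaces the three sequential any(endswith) scans over tuples of extensions with a single extension-to-kind table: the extension is extracted once (guarding the no-dot case) and looked up in a dict with default ''.
import Mathlib
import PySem

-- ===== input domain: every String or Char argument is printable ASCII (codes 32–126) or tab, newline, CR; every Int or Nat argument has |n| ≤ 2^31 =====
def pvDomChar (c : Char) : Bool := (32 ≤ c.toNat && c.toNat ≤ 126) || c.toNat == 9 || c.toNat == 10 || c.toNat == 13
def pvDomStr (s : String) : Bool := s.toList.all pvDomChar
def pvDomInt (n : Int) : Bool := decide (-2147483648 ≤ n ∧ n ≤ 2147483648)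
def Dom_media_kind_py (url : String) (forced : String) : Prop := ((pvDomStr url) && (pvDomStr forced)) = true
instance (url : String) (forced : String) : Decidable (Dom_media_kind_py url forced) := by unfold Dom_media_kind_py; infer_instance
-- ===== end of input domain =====

-- B replaces A's three sequential any(endswith) scans with a single extension→kind
-- table consulted once on the extracted extension (idiomatic, same cost).


-- ===== PORT A =====
def media_kind_py (url : String) (forced : String) : String :=
  if forced == "video" || forced == "gif" || forced == "photo" then forced
  else
    let u := PySem.Str.lower (if url == "" then "" else url)
    if [".mp4", ".mov", ".m4v", ".webm"].any (fun ext => PySem.Str.endswith u ext) then "video"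
    else if [".gif", ".gifv", ".apng"].any (fun ext => PySem.Str.endswith u ext) then "gif"
    else if [".jpg", ".jpeg", ".png", ".webp", ".bmp", ".heic", ".heif"].any (fun ext => PySem.Str.endswith u ext) then "photo"
    else ""

-- ===== PORT B =====
-- the module-level table _KIND_BY_EXT of Source B
def pvKindByExt : PySem.Dict String String :=
  ⟨[(".mp4", "video"), (".mov", "video"), (".m4v", "video"), (".webm", "video"),
    (".gif", "gif"), (".gifv", "gif"), (".apng", "gif"),
    (".jpg", "photo"), (".jpeg", "photo"), (".png", "photo"), (".webp", "photo"),
    (".bmp", "photo"), (".heic", "photo"), (".heif", "photo")]⟩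

-- hand port of u.rsplit(".", 1)[-1]: the part of u after its last '.', u itself when
-- u has no '.' — exact for this call (maxsplit 1, last piece taken)
def pvAfterLastDot : List Char → List Char
  | [] => []
  | c :: cs => if '.' ∈ cs then pvAfterLastDot cs else if c = '.' then cs else c :: cs

def media_kind_py_alt (url : String) (forced : String) : String :=
  if forced == "video" || forced == "gif" || forced == "photo" then forced
  else
    let u := PySem.Str.lower (if url == "" then "" else url)
    if PySem.Str.isIn "." u = false then ""
    else pvKindByExt.getD (String.ofList ('.' :: pvAfterLastDot u.toList)) ""

-- ===== PRECONDITION & SPEC =====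
def Spec_media_kind_py (url : String) (forced : String) (out : String) : Prop := out = media_kind_py_alt url forced
instance (url : String) (forced : String) (out : String) : Decidable (Spec_media_kind_py url forced out) := by unfold Spec_media_kind_py; infer_instance

-- ===== CLAIM (what is proved, stated in full; the proofs are below) =====
def Claim_equal_media_kind_py : Prop := ∀ (url : String) (forced : String), Dom_media_kind_py url forced → Spec_media_kind_py url forced (media_kind_py url forced)

-- ===== LEMMAS AND PROOFS =====

theorem pv_endswith_decide (s p : List Char) : PySem.Chars.endswith s p = decide (p <:+ s) := by
  by_cases h : p <:+ s
  · simp [h, (PySem.Chars.endswith_iff s p).mpr h]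
  · simp only [h, decide_false]
    exact Bool.eq_false_iff.mpr (fun he => h ((PySem.Chars.endswith_iff s p).mp he))

-- ends-with a dot-free extension ⟺ it IS the part after the last dot
theorem pvAfterLastDot_suffix_iff (t r : List Char) (hr : '.' ∉ r) :
    ('.' :: r) <:+ t ↔ ('.' ∈ t ∧ pvAfterLastDot t = r) := by
  induction t with
  | nil => simp
  | cons c cs ih =>
    rw [List.suffix_cons_iff]
    by_cases hd : '.' ∈ cs
    · have hne : ¬('.' :: r = c :: cs) := by
        intro h; injection h with h1 h2; exact hr (h2 ▸ hd)
      simp [pvAfterLastDot, hd, hne, ih]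
    · have hns : ¬(('.' :: r) <:+ cs) := fun h => hd (h.subset (List.mem_cons_self))
      by_cases hc : c = '.'
      · subst hc
        simp only [pvAfterLastDot, hd, hns, or_false, if_false, if_true]
        constructor
        · intro h; injection h with _ h2; simp [hd, h2]
        · rintro ⟨_, h2⟩; rw [h2]
      · have hnm : '.' ∉ c :: cs := by simp [hc, hd, Ne.symm]
        have hne : ¬('.' :: r = c :: cs) := by
          intro h; injection h with h1 _; exact hc h1.symm
        simp [pvAfterLastDot, hd, hc, hns, hne, hnm]

theorem pv_getD_eval (r : List Char) :
    pvKindByExt.getD (String.ofList ('.' :: r)) "" =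
      if r = "mp4".toList ∨ r = "mov".toList ∨ r = "m4v".toList ∨ r = "webm".toList then "video"
      else if r = "gif".toList ∨ r = "gifv".toList ∨ r = "apng".toList then "gif"
      else if r = "jpg".toList ∨ r = "jpeg".toList ∨ r = "png".toList ∨ r = "webp".toList ∨ r = "bmp".toList ∨ r = "heic".toList ∨ r = "heif".toList then "photo"
      else "" := by
  split_ifs with h1 h2 h3
  · rcases h1 with h | h | h | h <;> rw [h] <;> decide
  · rcases h2 with h | h | h <;> rw [h] <;> decide
  · rcases h3 with h | h | h | h | h | h | h <;> rw [h] <;> decide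
  · push Not at h1 h2 h3
    have hnone : List.find? (fun p => p.1 == String.ofList ('.' :: r)) pvKindByExt.items = none := by
      rw [List.find?_eq_none]
      intro x hx
      have hx' : x ∈ [((".mp4" : String), ("video" : String)), (".mov", "video"), (".m4v", "video"),
          (".webm", "video"), (".gif", "gif"), (".gifv", "gif"), (".apng", "gif"), (".jpg", "photo"),
          (".jpeg", "photo"), (".png", "photo"), (".webp", "photo"), (".bmp", "photo"),
          (".heic", "photo"), (".heif", "photo")] := hx
      simp only [List.mem_cons, List.not_mem_nil, or_false] at hx'
      rcases hx' with rfl | rfl | rfl | rfl | rfl | rfl | rfl | rfl | rfl | rfl | rfl | rfl | rfl | rfl <;>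
        · simp only [beq_iff_eq]
          intro heq
          have hl := congrArg String.toList heq
          rw [String.toList_ofList] at hl
          simp_all
    simp [PySem.Dict.getD, PySem.Dict.get?, hnone]

-- ===== VERDICT (by name: the statement is the Claim_ definition above) =====
theorem media_kind_py_spec : Claim_equal_media_kind_py := by
  intro url forced _
  unfold Spec_media_kind_py media_kind_py media_kind_py_alt
  by_cases hf : (forced == "video" || forced == "gif" || forced == "photo") = true
  · simp [hf]
  · simp only [hf, if_false, Bool.false_eq_true]
    set u := PySem.Str.lower (if url == "" then "" else url) with hu
    have hmem : ∀ (r : List Char), '.' ∉ r →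
        (('.' :: r) <:+ u.toList ↔ ('.' ∈ u.toList ∧ pvAfterLastDot u.toList = r)) :=
      fun r hr => pvAfterLastDot_suffix_iff u.toList r hr
    by_cases hdot : '.' ∈ u.toList
    · have hisin : PySem.Str.isIn "." u = true :=
        (PySem.Str.isIn_iff_infix "." u).mpr (by
          simp only [show ("." : String).toList = ['.'] from rfl]
          exact (List.singleton_infix_iff _ _).mpr hdot)
      simp only [List.any_cons, List.any_nil, PySem.Str.endswith_eq, pv_endswith_decide,
        hisin, Bool.true_eq_false, if_false, Bool.or_false]
      rw [pv_getD_eval]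
      have h1 := hmem ['m','p','4'] (by decide)
      have h2 := hmem ['m','o','v'] (by decide)
      have h3 := hmem ['m','4','v'] (by decide)
      have h4 := hmem ['w','e','b','m'] (by decide)
      have h5 := hmem ['g','i','f'] (by decide)
      have h6 := hmem ['g','i','f','v'] (by decide)
      have h7 := hmem ['a','p','n','g'] (by decide)
      have h8 := hmem ['j','p','g'] (by decide)
      have h9 := hmem ['j','p','e','g'] (by decide)
      have h10 := hmem ['p','n','g'] (by decide)
      have h11 := hmem ['w','e','b','p'] (by decide)
      have h12 := hmem ['b','m','p'] (by decide)
      have h13 := hmem ['h','e','i','c'] (by decide)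
      have h14 := hmem ['h','e','i','f'] (by decide)
      simp only [show (".mp4" : String).toList = '.' :: ['m','p','4'] from rfl,
        show (".mov" : String).toList = '.' :: ['m','o','v'] from rfl,
        show (".m4v" : String).toList = '.' :: ['m','4','v'] from rfl,
        show (".webm" : String).toList = '.' :: ['w','e','b','m'] from rfl,
        show (".gif" : String).toList = '.' :: ['g','i','f'] from rfl,
        show (".gifv" : String).toList = '.' :: ['g','i','f','v'] from rfl,
        show (".apng" : String).toList = '.' :: ['a','p','n','g'] from rfl,
        show (".jpg" : String).toList = '.' :: ['j','p','g'] from rfl,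
        show (".jpeg" : String).toList = '.' :: ['j','p','e','g'] from rfl,
        show (".png" : String).toList = '.' :: ['p','n','g'] from rfl,
        show (".webp" : String).toList = '.' :: ['w','e','b','p'] from rfl,
        show (".bmp" : String).toList = '.' :: ['b','m','p'] from rfl,
        show (".heic" : String).toList = '.' :: ['h','e','i','c'] from rfl,
        show (".heif" : String).toList = '.' :: ['h','e','i','f'] from rfl,
        h1, h2, h3, h4, h5, h6, h7, h8, h9, h10, h11, h12, h13, h14, hdot, true_and]
      simp only [show ("mp4" : String).toList = ['m','p','4'] from rfl,
        show ("mov" : String).toList = ['m','o','v'] from rfl,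
        show ("m4v" : String).toList = ['m','4','v'] from rfl,
        show ("webm" : String).toList = ['w','e','b','m'] from rfl,
        show ("gif" : String).toList = ['g','i','f'] from rfl,
        show ("gifv" : String).toList = ['g','i','f','v'] from rfl,
        show ("apng" : String).toList = ['a','p','n','g'] from rfl,
        show ("jpg" : String).toList = ['j','p','g'] from rfl,
        show ("jpeg" : String).toList = ['j','p','e','g'] from rfl,
        show ("png" : String).toList = ['p','n','g'] from rfl,
        show ("webp" : String).toList = ['w','e','b','p'] from rfl,
        show ("bmp" : String).toList = ['b','m','p'] from rfl,
        show ("heic" : String).toList = ['h','e','i','c'] from rfl,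
        show ("heif" : String).toList = ['h','e','i','f'] from rfl]
      simp [Bool.or_eq_true, decide_eq_true_eq]
    · have hisin : PySem.Str.isIn "." u = false := by
        cases h : PySem.Str.isIn "." u
        · rfl
        · exact absurd ((List.singleton_infix_iff _ _).mp
            (by simpa using (PySem.Str.isIn_iff_infix "." u).mp h)) hdot
      have hnosuf : ∀ (r : List Char), ¬(('.' :: r) <:+ u.toList) :=
        fun r h => hdot (h.subset (List.mem_cons_self))
      simp only [List.any_cons, List.any_nil, PySem.Str.endswith_eq, pv_endswith_decide, hisin, Bool.or_false]
      simp [show (".mp4" : String).toList = '.' :: ['m','p','4'] from rfl,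
        show (".mov" : String).toList = '.' :: ['m','o','v'] from rfl,
        show (".m4v" : String).toList = '.' :: ['m','4','v'] from rfl,
        show (".webm" : String).toList = '.' :: ['w','e','b','m'] from rfl,
        show (".gif" : String).toList = '.' :: ['g','i','f'] from rfl,
        show (".gifv" : String).toList = '.' :: ['g','i','f','v'] from rfl,
        show (".apng" : String).toList = '.' :: ['a','p','n','g'] from rfl,
        show (".jpg" : String).toList = '.' :: ['j','p','g'] from rfl,
        show (".jpeg" : String).toList = '.' :: ['j','p','e','g'] from rfl,
        show (".png" : String).toList = '.' :: ['p','n','g'] from rfl,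
        show (".webp" : String).toList = '.' :: ['w','e','b','p'] from rfl,
        show (".bmp" : String).toList = '.' :: ['b','m','p'] from rfl,
        show (".heic" : String).toList = '.' :: ['h','e','i','c'] from rfl,
        show (".heif" : String).toList = '.' :: ['h','e','i','f'] from rfl,
        hnosuf]
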